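-- pv_equiv track=rewrite | github.com/dimon41k2010/LeetCodeTasks | 2389-longest-subsequence-with-limited-sum/2389-longest-subsequence-with-limited-sum.py | answerQueries
-- ===== SOURCE A (Python) =====
-- from typing import List
--
-- def answerQueries(nums: List[int], queries: List[int]) -> List[int]:
--     nums.sort()
--     answer = []
--     for query in queries:
--         sub_sum = 0
--         for nums_i in range(len(nums)):
--             sub_sum += nums[nums_i]
--             if query < sub_sum:
--                 answer.append(nums_i)
--                 break
--             elif len(nums)-1 == nums_i:
--                 answer.append(nums_i+1)
--     return (answer)
-- ===== SOURCE B (Python) =====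
-- from bisect import bisect_right
-- from itertools import accumulate
-- from typing import List
--
-- def answerQueries(nums: List[int], queries: List[int]) -> List[int]:
--     nums.sort()
--     # running maximum of the prefix sums is nondecreasing, so each query is one binary search
--     mx = list(accumulate(accumulate(nums), max))
--     return [bisect_right(mx, q) for q in queries]
-- ===== Notes on version B (the rewrite author's own statement) =====
-- stated objective: faster
-- what changed: B replaces A's per-query linear re-summation of the sorted list by prefix sums computed once, their running maximum (nondecreasing, so correct even with negative numbers), and one bisect_right binary search per query.
-- intended difference: On empty nums with nonempty queries A returns [] (its inner loop never appends an answer), while B returns 0 for every query, the intended longest-subsequence length for an empty list. — e.g. on answerQueries([], [0]): A returns [], B returns [0]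
import Mathlib
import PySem

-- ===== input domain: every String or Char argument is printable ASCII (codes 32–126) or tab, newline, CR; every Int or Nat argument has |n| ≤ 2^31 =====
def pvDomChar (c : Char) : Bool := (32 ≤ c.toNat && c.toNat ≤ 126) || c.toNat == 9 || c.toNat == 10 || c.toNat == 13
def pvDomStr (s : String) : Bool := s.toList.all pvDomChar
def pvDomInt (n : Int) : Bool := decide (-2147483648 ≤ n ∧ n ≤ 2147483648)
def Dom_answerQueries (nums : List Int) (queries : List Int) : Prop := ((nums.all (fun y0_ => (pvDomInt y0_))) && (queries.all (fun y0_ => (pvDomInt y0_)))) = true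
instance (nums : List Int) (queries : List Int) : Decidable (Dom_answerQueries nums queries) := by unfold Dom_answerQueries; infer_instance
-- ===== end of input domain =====

-- B replaces A's per-query linear re-summation by prefix sums + running max + one binary search
-- per query (asymptotically faster); note A sorts `nums` in place (B does too) — the claim is about
-- the return value. On empty nums with nonempty queries A returns [] (its inner loop never appends);
-- B returns the intended 0 per query (see D_ below).


-- ===== PORT A =====
-- inner 'for nums_i in range(len(nums))' loop of A: walks the indices, reading nums[nums_i]
-- (here: the successive elements of the remaining suffix), accumulating sub_sum;
-- n is len(nums), fixed over the loop.
def aScan (query : Int) (n : Nat) : List Int → Nat → Int → List Int → List Int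
  | [], _, _, ans => ans
  | x :: rest, i, sub, ans =>
    let sub' := sub + x
    if query < sub' then ans ++ [(i : Int)]
    else if n - 1 == i then ans ++ [(i : Int) + 1]
    else aScan query n rest (i + 1) sub' ans

def answerQueries (nums : List Int) (queries : List Int) : List Int :=
  let s := PySem.List.sorted nums (fun x => x) false   -- nums.sort()
  queries.foldl (fun ans query => aScan query s.length s 0 0 ans) []

-- ===== PORT B =====
-- itertools.accumulate(l, f): running fold, hand-ported (not in PySem); exact for nonempty l via pyAccum
def pyAccum (f : Int → Int → Int) (acc : Int) : List Int → List Int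
  | [] => [acc]
  | y :: ys => acc :: pyAccum f (f acc y) ys

def pyAccumulate (f : Int → Int → Int) : List Int → List Int
  | [] => []
  | x :: xs => pyAccum f x xs

def answerQueries_alt (nums : List Int) (queries : List Int) : List Int :=
  let s := PySem.List.sorted nums (fun x => x) false   -- nums.sort()
  let mx := pyAccumulate max (pyAccumulate (· + ·) s)  -- running max of prefix sums
  queries.map (fun q => ((PySem.List.bisectRight mx q : Nat) : Int))

-- ===== PRECONDITION & SPEC =====
-- On nums = [] with queries ≠ [], A returns [] (one answer MISSING per query, since its inner loop
-- never appends), while B returns 0 for every query — the intended length of the longest affordable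
-- subsequence of an empty list.
def D_answerQueries (nums : List Int) (queries : List Int) : Prop := nums = [] ∧ queries ≠ []
instance (nums : List Int) (queries : List Int) : Decidable (D_answerQueries nums queries) := by unfold D_answerQueries; infer_instance

def Spec_answerQueries (nums : List Int) (queries : List Int) (out : List Int) : Prop :=
  ¬ D_answerQueries nums queries → out = answerQueries_alt nums queries
instance (nums : List Int) (queries : List Int) (out : List Int) : Decidable (Spec_answerQueries nums queries out) := by unfold Spec_answerQueries; infer_instance

def pvDiffWitness_answerQueries : List Int × List Int := ([], [0])
def pvDiffWitnessOut_answerQueries : (List Int) × (List Int) := ([], [0])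

-- ===== CLAIM (what is proved, stated in full; the proofs are below) =====
def Claim_unchanged_answerQueries : Prop := ∀ (nums : List Int) (queries : List Int), Dom_answerQueries nums queries → Spec_answerQueries nums queries (answerQueries nums queries)
def Claim_changed_answerQueries : Prop := Dom_answerQueries (pvDiffWitness_answerQueries.1) (pvDiffWitness_answerQueries.2) ∧ D_answerQueries (pvDiffWitness_answerQueries.1) (pvDiffWitness_answerQueries.2) ∧ answerQueries (pvDiffWitness_answerQueries.1) (pvDiffWitness_answerQueries.2) = pvDiffWitnessOut_answerQueries.1 ∧ answerQueries_alt (pvDiffWitness_answerQueries.1) (pvDiffWitness_answerQueries.2) = pvDiffWitnessOut_answerQueries.2 ∧ pvDiffWitnessOut_answerQueries.1 ≠ pvDiffWitnessOut_answerQueries.2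
def Claim_exact_answerQueries : Prop := ∀ (nums : List Int) (queries : List Int), Dom_answerQueries nums queries → D_answerQueries nums queries → answerQueries nums queries ≠ answerQueries_alt nums queries

-- ===== LEMMAS AND PROOFS =====

-- length of the "prefix still affordable under q" block
def tw (l : List Int) (q : Int) : Nat := (l.takeWhile (fun p => decide (p ≤ q))).length

theorem tw_cons (x : Int) (xs : List Int) (q : Int) :
    tw (x :: xs) q = if x ≤ q then tw xs q + 1 else 0 := by
  by_cases hx : x ≤ q
  · simp [tw, List.takeWhile, hx]
  · simp [tw, List.takeWhile, hx]

theorem tw_le (l : List Int) (q : Int) : tw l q ≤ l.length := by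
  induction l with
  | nil => simp [tw]
  | cons x xs ih => rw [tw_cons]; split <;> simp <;> omega

theorem tw_prop1 : ∀ (l : List Int) (q : Int) (j : Nat), j < tw l q → l.getD j 0 ≤ q := by
  intro l
  induction l with
  | nil => intro q j hj; simp [tw] at hj
  | cons x xs ih =>
    intro q j hj
    rw [tw_cons] at hj
    by_cases hx : x ≤ q
    · rw [if_pos hx] at hj
      cases j with
      | zero => simpa using hx
      | succ k => simpa using ih q k (by omega)
    · rw [if_neg hx] at hj; omega

theorem tw_prop2 : ∀ (l : List Int) (q : Int), tw l q < l.length → q < l.getD (tw l q) 0 := by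
  intro l
  induction l with
  | nil => intro q h; simp [tw] at h
  | cons x xs ih =>
    intro q h
    rw [tw_cons] at h ⊢
    by_cases hx : x ≤ q
    · rw [if_pos hx] at h ⊢
      simpa using ih q (by simpa using h)
    · rw [if_neg hx] at h ⊢
      simpa using lt_of_not_ge hx

theorem bisect_eq_tw (l : List Int) (hs : l.Pairwise (· ≤ ·)) (q : Int) :
    PySem.List.bisectRight l q = tw l q := by
  obtain ⟨hle, h1, h2⟩ := PySem.List.bisectRight_spec l q hs
  rcases Nat.lt_trichotomy (PySem.List.bisectRight l q) (tw l q) with h | h | h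
  · have hlen : PySem.List.bisectRight l q < l.length := lt_of_lt_of_le h (tw_le l q)
    have ha : l.getD (PySem.List.bisectRight l q) 0 ≤ q := tw_prop1 l q _ h
    have hb := h2 _ hlen (le_refl _)
    rw [List.getD_eq_getElem l 0 hlen] at ha
    omega
  · exact h
  · have hlen : tw l q < l.length := lt_of_lt_of_le h hle
    have ha := h1 _ hlen h
    have hb := tw_prop2 l q hlen
    rw [List.getD_eq_getElem l 0 hlen] at hb
    omega

-- every element of a running-max list is ≥ its seed
theorem pyAccum_max_ge (l : List Int) : ∀ (acc b : Int), b ∈ pyAccum max acc l → acc ≤ b := by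
  induction l with
  | nil => intro acc b hb; simp [pyAccum] at hb; omega
  | cons y ys ih =>
    intro acc b hb
    simp only [pyAccum, List.mem_cons] at hb
    rcases hb with rfl | hb
    · exact le_refl _
    · exact le_trans (le_max_left acc y) (ih (max acc y) b hb)

theorem pyAccum_max_pairwise (l : List Int) : ∀ acc : Int, (pyAccum max acc l).Pairwise (· ≤ ·) := by
  induction l with
  | nil => intro acc; simp [pyAccum]
  | cons y ys ih =>
    intro acc
    simp only [pyAccum, List.pairwise_cons]
    exact ⟨fun b hb => le_trans (le_max_left acc y) (pyAccum_max_ge ys (max acc y) b hb), ih _⟩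

theorem tw_pyAccum_max (l : List Int) (q : Int) : ∀ acc : Int, tw (pyAccum max acc l) q = tw (acc :: l) q := by
  induction l with
  | nil => intro acc; simp [pyAccum]
  | cons y ys ih =>
    intro acc
    by_cases hacc : acc ≤ q
    · have hd : (decide (acc ≤ q)) = true := by simpa using hacc
      simp only [pyAccum, tw, List.takeWhile, hd] at *
      simp only [List.length_cons, Nat.add_right_cancel_iff]
      have h1 := ih (max acc y)
      by_cases hy : y ≤ q
      · have : (decide (max acc y ≤ q)) = true := by simp [hacc, hy]
        simp only [tw, List.takeWhile, this, show (decide (y ≤ q)) = true by simpa using hy] at h1 ⊢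
        simpa using h1
      · have : (decide (max acc y ≤ q)) = false := by simp; omega
        simp only [tw, List.takeWhile, this, show (decide (y ≤ q)) = false by simpa using hy] at h1 ⊢
        simpa using h1
    · have hd : (decide (acc ≤ q)) = false := by simpa using hacc
      simp [pyAccum, tw, List.takeWhile, hd]

theorem pairwise_accmax (p : List Int) : (pyAccumulate max p).Pairwise (· ≤ ·) := by
  cases p with
  | nil => simp [pyAccumulate]
  | cons x xs => simpa [pyAccumulate] using pyAccum_max_pairwise xs x

theorem tw_accmax (p : List Int) (q : Int) : tw (pyAccumulate max p) q = tw p q := by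
  cases p with
  | nil => simp [pyAccumulate]
  | cons x xs => simpa [pyAccumulate] using tw_pyAccum_max xs q x

-- A's inner loop computes "i + length of the affordable prefix-sum block from here on"
theorem aScan_eq (q : Int) : ∀ (rs : List Int) (r : Int) (n i : Nat) (sub : Int) (ans : List Int),
    n = i + 1 + rs.length →
    aScan q n (r :: rs) i sub ans = ans ++ [((i + tw (pyAccum (· + ·) (sub + r) rs) q : Nat) : Int)] := by
  intro rs
  induction rs with
  | nil =>
    intro r n i sub ans hn
    have hni : n - 1 == i := by simp [hn]
    by_cases hq : q < sub + r
    · simp [aScan, hq, pyAccum, tw, List.takeWhile, show (decide (sub + r ≤ q)) = false by simp; omega]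
    · simp only [aScan, if_neg hq, hni, if_pos rfl]
      have : (decide (sub + r ≤ q)) = true := by simp; omega
      simp [pyAccum, tw, List.takeWhile, this]
  | cons h t ih =>
    intro r n i sub ans hn
    have hni : (n - 1 == i) = false := by simp [hn]; omega
    by_cases hq : q < sub + r
    · simp [aScan, hq, pyAccum, tw, List.takeWhile, show (decide (sub + r ≤ q)) = false by simp; omega]
    · rw [aScan]
      simp only [if_neg hq, hni, Bool.false_eq_true, if_false]
      rw [ih h n (i + 1) (sub + r) ans (by simp [hn]; omega)]
      have hd : (decide (sub + r ≤ q)) = true := by simp; omega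
      simp only [pyAccum, tw, List.takeWhile, hd]
      congr 1
      simp only [tw, List.length_cons]
      push_cast
      ring

-- the per-query value both programs produce on a nonempty sorted list
theorem per_query (s : List Int) (r : Int) (rs : List Int) (hs : s = r :: rs) (q : Int) (ans : List Int) :
    aScan q s.length s 0 0 ans
      = ans ++ [((PySem.List.bisectRight (pyAccumulate max (pyAccumulate (· + ·) s)) q : Nat) : Int)] := by
  subst hs
  rw [aScan_eq q rs r _ 0 0 ans (by simp; omega)]
  rw [bisect_eq_tw _ (pairwise_accmax _) q, tw_accmax]
  simp [pyAccumulate]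

theorem answerQueries_spec : Claim_unchanged_answerQueries := by
  intro nums queries _ hnd
  show answerQueries nums queries = answerQueries_alt nums queries
  cases hq : queries with
  | nil => simp [answerQueries, answerQueries_alt]
  | cons q0 qs =>
    have hnums : nums ≠ [] := by
      intro h
      exact hnd ⟨h, by simp [hq]⟩
    have hslen : (PySem.List.sorted nums (fun x => x) false).length ≠ 0 := by
      rw [PySem.List.length_sorted]
      simpa using fun h => hnums (List.length_eq_zero_iff.mp h)
    obtain ⟨r, rs, hs⟩ : ∃ r rs, PySem.List.sorted nums (fun x => x) false = r :: rs := by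
      cases h : PySem.List.sorted nums (fun x => x) false with
      | nil => exact absurd (by simp [h]) hslen
      | cons a b => exact ⟨a, b, rfl⟩
    show (q0 :: qs).foldl (fun ans query => aScan query _ _ 0 0 ans) [] = _
    rw [← hq]
    have key : ∀ (l : List Int) (acc : List Int),
        l.foldl (fun ans query => aScan query (PySem.List.sorted nums (fun x => x) false).length (PySem.List.sorted nums (fun x => x) false) 0 0 ans) acc
          = acc ++ l.map (fun q => ((PySem.List.bisectRight (pyAccumulate max (pyAccumulate (· + ·) (PySem.List.sorted nums (fun x => x) false))) q : Nat) : Int)) := by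
      intro l
      induction l with
      | nil => intro acc; simp
      | cons a b ihb =>
        intro acc
        simp only [List.foldl_cons, List.map_cons]
        rw [per_query _ r rs hs a acc, ihb]
        simp
    simpa [answerQueries, answerQueries_alt] using key queries []

-- ===== VERDICT (by name: the statement is the Claim_ definition above) =====
theorem answerQueries_changed : Claim_changed_answerQueries := by
  unfold Claim_changed_answerQueries; decide

theorem answerQueries_tight : Claim_exact_answerQueries := by
  intro nums queries _ hd heq
  obtain ⟨h1, h2⟩ := hd
  subst h1
  have hA : answerQueries [] queries = [] := by
    have : ∀ (l : List Int) (n : Nat), l.foldl (fun ans query => aScan query n [] 0 0 ans) [] = [] := by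
      intro l n
      induction l with
      | nil => rfl
      | cons a b ih => simpa [aScan] using ih
    simpa [answerQueries] using this queries _
  have hB : (answerQueries_alt [] queries).length = queries.length := by
    simp [answerQueries_alt]
  rw [hA] at heq
  rw [← heq] at hB
  simp at hB
  exact h2 (List.length_eq_zero_iff.mp hB.symm)
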